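-- pv_equiv track=rewrite | github.com/mbh038/PE | PE_0115/PE_0115.py | F
-- ===== SOURCE A (Python) =====
-- def F(m,n,memo={}):
--
--     blocks={k:[0,1] for k in range (1,m)}
--     blocks[0]=[0,0]
--     blocks[m]=[1,1]
--     try:
--         return memo[(m,n)]
--     except KeyError:
--         for L in range (m+1,n+1):
--             blocks.setdefault(L,[]).append(blocks[L-1][0]+blocks[L-m][1]) #red left-edged solutions
--             blocks.setdefault(L,[]).append(blocks[L-1][0]+blocks[L-1][1]) #black left-edged solutions
--         result =sum(blocks[L])
--         memo[(m,n)]=result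
--     return result
-- ===== SOURCE B (Python) =====
-- def F(m, n, memo={}):
--     try:
--         return memo[(m, n)]
--     except KeyError:
--         pass
--     # single table of TOTAL counts T[L] = red(L) + black(L)
--     T = [0] + [1] * (m - 1) + [2]
--     for L in range(m + 1, n + 1):
--         # base case of the total recurrence at L == m+1, then the linear recurrence
--         T.append(4 if L == m + 1 else 2 * T[L - 1] - T[L - 2] + T[L - m - 1])
--     result = T[L]
--     memo[(m, n)] = result
--     return result
-- ===== Notes on version B (the rewrite author's own statement) =====
-- stated objective: faster
-- what changed: Replaces the dict of (red,black) pairs and the two edge-rule appends per position by a flat list of total counts driven by the single linear recurrence T(L)=2*T(L-1)-T(L-2)+T(L-m-1) seeded directly at positions 0..m+1.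
import Mathlib
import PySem

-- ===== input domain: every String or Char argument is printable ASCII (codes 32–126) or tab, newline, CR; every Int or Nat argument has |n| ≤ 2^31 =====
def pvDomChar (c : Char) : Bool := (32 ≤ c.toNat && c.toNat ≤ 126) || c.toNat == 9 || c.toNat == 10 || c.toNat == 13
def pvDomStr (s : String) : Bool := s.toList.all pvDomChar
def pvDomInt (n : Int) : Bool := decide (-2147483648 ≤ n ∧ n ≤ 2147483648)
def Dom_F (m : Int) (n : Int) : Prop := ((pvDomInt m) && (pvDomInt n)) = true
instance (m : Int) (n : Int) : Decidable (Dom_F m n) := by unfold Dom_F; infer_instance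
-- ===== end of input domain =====

-- B replaces A's dict of (red,black) pairs by a flat list of totals driven by one linear
-- recurrence; equivalence is about the RETURN value (A's cross-call memo caching is not modelled).

-- ===== PORT A =====
-- Transliteration of Source A. The memo (a fresh-process miss) is skipped; the final
-- 'sum(blocks[L])' reads the loop variable, which equals n under Pre_F (n ≥ m+1).
def F (m : Int) (n : Int) : Int :=
  let blocks : PySem.Dict Int (List Int) :=
    (PySem.List.pyRange 1 m 1).foldl (fun d k => d.insert k [0, 1]) PySem.Dict.empty
  let blocks := blocks.insert 0 [0, 0]
  let blocks := blocks.insert m [1, 1]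
  let blocks := (PySem.List.pyRange (m + 1) (n + 1) 1).foldl
    (fun d L =>
      -- blocks.setdefault(L,[]).append(blocks[L-1][0]+blocks[L-m][1])
      let d1 := d.modify L []
        (fun v => v ++ [PySem.List.pyGetD (d.getD (L - 1) []) 0 0 +
                        PySem.List.pyGetD (d.getD (L - m) []) 1 0])
      -- blocks.setdefault(L,[]).append(blocks[L-1][0]+blocks[L-1][1])
      d1.modify L []
        (fun v => v ++ [PySem.List.pyGetD (d1.getD (L - 1) []) 0 0 +
                        PySem.List.pyGetD (d1.getD (L - 1) []) 1 0])) blocks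
  (blocks.getD n []).foldl (· + ·) 0

-- ===== PORT B =====
-- Transliteration of Source B (memo miss skipped as for A).
def F_alt (m : Int) (n : Int) : Int :=
  let T : List Int := [0] ++ List.replicate (m - 1).toNat 1 ++ [2]
  let T := (PySem.List.pyRange (m + 1) (n + 1) 1).foldl
    (fun T L => T ++ [if L = m + 1 then 4 else
        2 * PySem.List.pyGetD T (L - 1) 0 - PySem.List.pyGetD T (L - 2) 0 +
        PySem.List.pyGetD T (L - m - 1) 0]) T
  -- result = T[L]: the loop variable L equals n under Pre_F (n ≥ m + 1)
  PySem.List.pyGetD T n 0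

-- ===== PRECONDITION & SPEC =====
-- Pre_F admits exactly the fresh-call inputs on which A returns: for n ≤ m the loop never
-- binds L and A raises UnboundLocalError, and for m ≤ 0 A raises (IndexError/KeyError).
def Pre_F (m : Int) (n : Int) : Prop := 1 ≤ m ∧ m + 1 ≤ n
instance (m : Int) (n : Int) : Decidable (Pre_F m n) := by unfold Pre_F; infer_instance
def pvWitness_F : Int × Int := (3, 7)

def Spec_F (m : Int) (n : Int) (out : Int) : Prop := out = F_alt m n
instance (m : Int) (n : Int) (out : Int) : Decidable (Spec_F m n out) := by unfold Spec_F; infer_instance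

-- ===== CLAIM (what is proved, stated in full; the proofs are below) =====
def Claim_equal_F : Prop := ∀ (m : Int) (n : Int), Dom_F m n → Pre_F m n → Spec_F m n (F m n)

-- ===== LEMMAS AND PROOFS =====

-- reference sequence: (red, black) counts per position, for block length m ≥ 1
def rb (m : Nat) (k : Nat) : Int × Int :=
  match k with
  | 0 => (0, 0)
  | j + 1 =>
    if _hm : m = 0 then (0, 0)
    else if j + 1 < m then (0, 1)
    else if j + 1 = m then (1, 1)
    else ((rb m j).1 + (rb m (j + 1 - m)).2, (rb m j).1 + (rb m j).2)
  termination_by k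
  decreasing_by all_goals omega

def tb (m k : Nat) : Int := (rb m k).1 + (rb m k).2

theorem rb_lt {m k : Nat} (h1 : 1 ≤ k) (h2 : k < m) : rb m k = (0, 1) := by
  obtain ⟨j, rfl⟩ : ∃ j, k = j + 1 := ⟨k - 1, by omega⟩
  rw [rb]; simp only [show ¬ m = 0 by omega, dite_false]
  rw [if_pos h2]

theorem rb_self {m : Nat} (hm : 1 ≤ m) : rb m m = (1, 1) := by
  obtain ⟨j, rfl⟩ : ∃ j, m = j + 1 := ⟨m - 1, by omega⟩
  rw [rb]; simp only [show ¬ j + 1 = 0 by omega, dite_false]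
  rw [if_neg (by omega)]; simp

theorem rb_gt {m k : Nat} (h : m < k) (hm : 1 ≤ m) :
    rb m k = ((rb m (k - 1)).1 + (rb m (k - m)).2, (rb m (k - 1)).1 + (rb m (k - 1)).2) := by
  obtain ⟨j, rfl⟩ : ∃ j, k = j + 1 := ⟨k - 1, by omega⟩
  rw [rb]; simp only [show ¬ m = 0 by omega, dite_false]
  rw [if_neg (by omega), if_neg (by omega)]
  simp

theorem rb_snd_eq_tb {m k : Nat} (hm : 1 ≤ m) (hk : 2 ≤ k) : (rb m k).2 = tb m (k - 1) := by
  rcases lt_trichotomy k m with h | h | h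
  · rw [rb_lt (by omega) h]
    unfold tb
    rw [rb_lt (by omega) (by omega)]; norm_num
  · subst h
    rw [rb_self hm]
    unfold tb
    rcases Nat.eq_or_lt_of_le hk with h2 | h2
    · rw [show k - 1 = 1 by omega, rb_lt (by omega) (by omega)]; norm_num
    · rw [rb_lt (by omega) (by omega)]; norm_num
  · rw [rb_gt h hm]; rfl

theorem tb_zero (m : Nat) : tb m 0 = 0 := by simp [tb, rb]
theorem tb_lt {m k : Nat} (h1 : 1 ≤ k) (h2 : k < m) : tb m k = 1 := by
  unfold tb; rw [rb_lt h1 h2]; norm_num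
theorem tb_self {m : Nat} (hm : 1 ≤ m) : tb m m = 2 := by
  unfold tb; rw [rb_self hm]; norm_num
theorem tb_succ_self {m : Nat} (hm : 1 ≤ m) : tb m (m + 1) = 4 := by
  unfold tb
  rw [rb_gt (by omega) hm]
  simp only [Nat.add_sub_cancel]
  rw [rb_self hm]
  have h1 : (rb m (m + 1 - m)).2 = 1 := by
    rw [show m + 1 - m = 1 by omega]
    rcases Nat.eq_or_lt_of_le hm with h | h
    · rw [← h, rb_self (by omega)]
    · rw [rb_lt (by omega) (by omega)]
  rw [h1]; ring

theorem tb_rec {m k : Nat} (hm : 1 ≤ m) (hk : m + 2 ≤ k) :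
    tb m k = 2 * tb m (k - 1) - tb m (k - 2) + tb m (k - m - 1) := by
  have h1 : (rb m (k - 1)).2 = tb m (k - 2) := by
    rw [rb_snd_eq_tb hm (by omega), show k - 1 - 1 = k - 2 by omega]
  have h2 : (rb m (k - m)).2 = tb m (k - m - 1) := rb_snd_eq_tb hm (by omega)
  have h3 : (rb m (k - 1)).1 = tb m (k - 1) - tb m (k - 2) := by
    have := h1; unfold tb at *; omega
  have e1 : tb m k = 2 * (rb m (k - 1)).1 + (rb m (k - 1)).2 + (rb m (k - m)).2 := by
    unfold tb
    rw [rb_gt (show m < k by omega) hm]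
    ring
  rw [e1, h2, h1, h3]
  ring

-- the value stored at key k after the whole computation, as a function of (m, k)
def pairAt (M : Nat) (j k : Int) : List Int :=
  if 0 ≤ k ∧ k ≤ j then [(rb M k.toNat).1, (rb M k.toNat).2] else []

theorem getD_foldl_insert_const {v d0 : List Int} (l : List Int) (e : PySem.Dict Int (List Int)) (k : Int) :
    (l.foldl (fun d x => d.insert x v) e).getD k d0 = if k ∈ l then v else e.getD k d0 := by
  induction l generalizing e with
  | nil => simp
  | cons x t ih =>
    simp only [List.foldl_cons, ih, PySem.Dict.getD_insert, List.mem_cons]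
    by_cases h1 : k ∈ t
    · simp [h1]
    · by_cases h2 : k = x <;> simp [h1, h2]

theorem init_spec (m : Int) (hm : 1 ≤ m) (k : Int) :
    ((((PySem.List.pyRange 1 m 1).foldl (fun d x => d.insert x [0, 1]) PySem.Dict.empty).insert
      0 [0, 0]).insert m [1, 1]).getD k [] = pairAt m.toNat m k := by
  rw [PySem.Dict.getD_insert, PySem.Dict.getD_insert, getD_foldl_insert_const]
  simp only [PySem.List.mem_pyRange_one]
  unfold pairAt
  by_cases hk : k = m
  · subst hk
    rw [if_pos rfl, if_pos (show 0 ≤ k ∧ k ≤ k from ⟨by omega, le_refl k⟩),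
        rb_self (show 1 ≤ k.toNat by omega)]
  · rw [if_neg hk]
    by_cases h0 : k = 0
    · subst h0
      rw [if_pos rfl, if_pos (show (0 : Int) ≤ 0 ∧ 0 ≤ m from ⟨le_refl 0, by omega⟩)]
      simp [rb]
    · rw [if_neg h0]
      by_cases hr : 1 ≤ k ∧ k < m
      · obtain ⟨hr1, hr2⟩ := hr
        rw [if_pos ⟨hr1, hr2⟩, if_pos (show 0 ≤ k ∧ k ≤ m from ⟨by omega, by omega⟩),
            rb_lt (show 1 ≤ k.toNat by omega) (show k.toNat < m.toNat by omega)]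
      · rw [if_neg hr, if_neg (show ¬ (0 ≤ k ∧ k ≤ m) by omega), PySem.Dict.getD_empty]

theorem pyGetD_pair0 (a b : Int) : PySem.List.pyGetD [a, b] 0 0 = a := rfl
theorem pyGetD_pair1 (a b : Int) : PySem.List.pyGetD [a, b] 1 0 = b := rfl

theorem pairAt_succ_ne {M : Nat} {j k : Int} (hk : k ≠ j + 1) : pairAt M (j + 1) k = pairAt M j k := by
  unfold pairAt
  by_cases h : 0 ≤ k ∧ k ≤ j
  · rw [if_pos ⟨h.1, by omega⟩, if_pos h]
  · rw [if_neg (by omega), if_neg h]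

-- one iteration of A's loop extends the table by the pair at position j+1
theorem step_spec (m j : Int) (hm : 1 ≤ m) (hj : m ≤ j)
    (d : PySem.Dict Int (List Int)) (hd : ∀ k, d.getD k [] = pairAt m.toNat j k) (k : Int) :
    ((d.modify (j + 1) []
        (fun v => v ++ [PySem.List.pyGetD (d.getD (j + 1 - 1) []) 0 0 +
                        PySem.List.pyGetD (d.getD (j + 1 - m) []) 1 0])).modify (j + 1) []
        (fun v => v ++ [PySem.List.pyGetD ((d.modify (j + 1) []
            (fun v => v ++ [PySem.List.pyGetD (d.getD (j + 1 - 1) []) 0 0 +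
                            PySem.List.pyGetD (d.getD (j + 1 - m) []) 1 0])).getD (j + 1 - 1) []) 0 0 +
                        PySem.List.pyGetD ((d.modify (j + 1) []
            (fun v => v ++ [PySem.List.pyGetD (d.getD (j + 1 - 1) []) 0 0 +
                            PySem.List.pyGetD (d.getD (j + 1 - m) []) 1 0])).getD (j + 1 - 1) []) 1 0])).getD k []
      = pairAt m.toNat (j + 1) k := by
  simp only [show j + 1 - 1 = j from by ring]
  simp only [PySem.Dict.getD_modify, hd]
  simp only [if_neg (show ¬ j = j + 1 by omega)]
  by_cases hk : k = j + 1
  · subst hk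
    have hjj : pairAt m.toNat j j = [(rb m.toNat j.toNat).1, (rb m.toNat j.toNat).2] := by
      unfold pairAt; rw [if_pos ⟨by omega, le_refl j⟩]
    have hjm : pairAt m.toNat j (j + 1 - m)
        = [(rb m.toNat (j + 1 - m).toNat).1, (rb m.toNat (j + 1 - m).toNat).2] := by
      unfold pairAt; rw [if_pos ⟨by omega, by omega⟩]
    have hnone : pairAt m.toNat j (j + 1) = [] := by
      unfold pairAt; rw [if_neg (by omega)]
    simp only [ite_true, hjj, hjm, hnone, pyGetD_pair0, pyGetD_pair1,
      List.nil_append]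
    unfold pairAt
    rw [if_pos ⟨by omega, le_refl (j + 1)⟩]
    rw [rb_gt (show m.toNat < (j + 1).toNat by omega) (show 1 ≤ m.toNat by omega)]
    rw [show (j + 1).toNat - 1 = j.toNat by omega, show (j + 1).toNat - m.toNat = (j + 1 - m).toNat by omega]
    rfl
  · simp only [if_neg hk]
    exact (pairAt_succ_ne hk).symm

-- the A-side loop invariant
theorem loop_spec_A (m : Int) (hm : 1 ≤ m) (j : Int) (hj : m ≤ j) (k : Int) :
    ((PySem.List.pyRange (m + 1) (j + 1) 1).foldl
      (fun d L =>
        let d1 := d.modify L []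
          (fun v => v ++ [PySem.List.pyGetD (d.getD (L - 1) []) 0 0 +
                          PySem.List.pyGetD (d.getD (L - m) []) 1 0])
        d1.modify L []
          (fun v => v ++ [PySem.List.pyGetD (d1.getD (L - 1) []) 0 0 +
                          PySem.List.pyGetD (d1.getD (L - 1) []) 1 0]))
      ((((PySem.List.pyRange 1 m 1).foldl (fun d x => d.insert x [0, 1]) PySem.Dict.empty).insert
        0 [0, 0]).insert m [1, 1])).getD k [] = pairAt m.toNat j k := by
  induction j, hj using Int.le_induction generalizing k with
  | base =>
    rw [show PySem.List.pyRange (m + 1) (m + 1) 1 = [] from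
        PySem.List.pyRange_one_eq_nil (by omega), List.foldl_nil]
    exact init_spec m hm k
  | succ j hj ih =>
    rw [show PySem.List.pyRange (m + 1) (j + 1 + 1) 1
          = PySem.List.pyRange (m + 1) (j + 1) 1 ++ [j + 1] from
        PySem.List.pyRange_one_succ_right (by omega), List.foldl_append, List.foldl_cons,
        List.foldl_nil]
    exact step_spec m j hm hj _ ih k

theorem final_sum (m n : Int) (hm : 1 ≤ m) (hn : m + 1 ≤ n) :
    F m n = tb m.toNat n.toNat := by
  have h := loop_spec_A m hm n (by omega) n
  unfold F
  simp only [h]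
  unfold pairAt
  rw [if_pos ⟨by omega, le_refl n⟩]
  simp only [List.foldl_cons, List.foldl_nil]
  unfold tb
  ring

theorem pyGetD_map_range (f : Nat → Int) (N : Nat) (i : Int) (h0 : 0 ≤ i) (hi : i.toNat < N) :
    PySem.List.pyGetD ((List.range N).map f) i 0 = f i.toNat := by
  rw [PySem.List.pyGetD_eq_getElem _ _ h0 (by simp; omega)]
  simp

theorem T0_spec (m : Int) (hm : 1 ≤ m) :
    [(0 : Int)] ++ List.replicate (m - 1).toNat 1 ++ [2]
      = (List.range (m + 1).toNat).map (tb m.toNat) := by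
  apply List.ext_getElem (by simp; omega)
  intro i h1 h2
  simp only [List.getElem_map, List.getElem_range]
  simp only [List.getElem_append, List.length_append, List.length_cons, List.length_nil,
    List.length_replicate, List.getElem_replicate]
  simp only [List.length_append, List.length_cons, List.length_nil, List.length_replicate] at h1
  split_ifs with hA hB
  · -- i < 1
    simp only [List.getElem_singleton]
    rw [show i = 0 by omega, tb_zero]
  · -- 1 ≤ i < 1 + (m-1).toNat : replicate region
    rw [tb_lt (show 1 ≤ i by omega) (show i < m.toNat by omega)]
  · -- i = m.toNat : the [2]
    simp only [List.getElem_singleton]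
    rw [show i = m.toNat by omega, tb_self (show 1 ≤ m.toNat by omega)]

theorem loop_spec_B (m : Int) (hm : 1 ≤ m) (j : Int) (hj : m ≤ j) :
    (PySem.List.pyRange (m + 1) (j + 1) 1).foldl
      (fun T L => T ++ [if L = m + 1 then 4 else
          2 * PySem.List.pyGetD T (L - 1) 0 - PySem.List.pyGetD T (L - 2) 0 +
          PySem.List.pyGetD T (L - m - 1) 0])
      ([(0 : Int)] ++ List.replicate (m - 1).toNat 1 ++ [2])
      = (List.range (j + 1).toNat).map (tb m.toNat) := by
  induction j, hj using Int.le_induction with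
  | base =>
    rw [show PySem.List.pyRange (m + 1) (m + 1) 1 = [] from
        PySem.List.pyRange_one_eq_nil (by omega), List.foldl_nil]
    exact T0_spec m hm
  | succ j hj ih =>
    rw [show PySem.List.pyRange (m + 1) (j + 1 + 1) 1
          = PySem.List.pyRange (m + 1) (j + 1) 1 ++ [j + 1] from
        PySem.List.pyRange_one_succ_right (by omega), List.foldl_append, List.foldl_cons,
        List.foldl_nil, ih]
    rw [show (j + 1 + 1).toNat = (j + 1).toNat + 1 by omega, List.range_succ, List.map_append]
    simp only [List.map_cons, List.map_nil]
    by_cases hj1 : j = m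
    · subst hj1
      rw [if_pos rfl, show (j + 1).toNat = j.toNat + 1 by omega,
          tb_succ_self (show 1 ≤ j.toNat by omega)]
    · rw [if_neg (show ¬ j + 1 = m + 1 by omega)]
      simp only [show j + 1 - 1 = j from by ring, show j + 1 - 2 = j - 1 from by ring,
        show j + 1 - m - 1 = j - m from by ring]
      rw [pyGetD_map_range _ _ j (by omega) (by omega),
          pyGetD_map_range _ _ (j - 1) (by omega) (by omega),
          pyGetD_map_range _ _ (j - m) (by omega) (by omega)]
      rw [tb_rec (show 1 ≤ m.toNat by omega) (show m.toNat + 2 ≤ (j + 1).toNat by omega)]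
      rw [show (j + 1).toNat - 1 = j.toNat by omega, show (j + 1).toNat - 2 = (j - 1).toNat by omega,
          show (j + 1).toNat - m.toNat - 1 = (j - m).toNat by omega]

theorem alt_spec (m n : Int) (hm : 1 ≤ m) (hn : m + 1 ≤ n) :
    F_alt m n = tb m.toNat n.toNat := by
  have h := loop_spec_B m hm n (by omega)
  unfold F_alt
  simp only [h]
  exact pyGetD_map_range _ _ n (by omega) (by omega)

-- ===== VERDICT (by name: the statement is the Claim_ definition above) =====
theorem F_spec : Claim_equal_F := by
  intro m n _ hpre
  unfold Spec_F
  rw [final_sum m n hpre.1 hpre.2, alt_spec m n hpre.1 hpre.2]
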